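-- pv_equiv track=rewrite | github.com/PacoV3/emtech-p1 | PROYECTO-01-VENTURA-FRANCISCO.py | product_reviews_dict
-- ===== SOURCE A (Python) =====
-- def product_reviews_dict(sales):
--     '''Function for grouping the products by their review and also the
--     amount of times a review was made'''
--     reviews = {}
--     # For each sale get the review and save it together with a counter
--     # to calculate the average review for each product
--     for sale in sales:
--         refund = sale[4]
--         if not refund:
--             product_id = sale[1]
--             review = sale[2]
--             if product_id in reviews:
--                 reviews[product_id][0] += review
--                 reviews[product_id][1] += 1
--             else:
--                 reviews[product_id] = [review, 1]
--     return reviews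
-- ===== SOURCE B (Python) =====
-- def product_reviews_dict(sales):
--     '''Group non-refunded sales by product: [sum of reviews, count].'''
--     kept = [(s[1], s[2]) for s in sales if not s[4]]
--     order = list(dict.fromkeys(p for p, _ in kept))
--     return {p: [sum(r for q, r in kept if q == p),
--                 sum(1 for q, _ in kept if q == p)]
--             for p in order}
-- ===== Notes on version B (the rewrite author's own statement) =====
-- stated objective: alternative
-- what changed: Replaces A's single fold that mutates a dict entry per sale with a three-stage pipeline: filter out refunds, dedup product ids in first-occurrence order, then build each [review-sum, count] entry by per-key comprehensions over the filtered list.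
import Mathlib
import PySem

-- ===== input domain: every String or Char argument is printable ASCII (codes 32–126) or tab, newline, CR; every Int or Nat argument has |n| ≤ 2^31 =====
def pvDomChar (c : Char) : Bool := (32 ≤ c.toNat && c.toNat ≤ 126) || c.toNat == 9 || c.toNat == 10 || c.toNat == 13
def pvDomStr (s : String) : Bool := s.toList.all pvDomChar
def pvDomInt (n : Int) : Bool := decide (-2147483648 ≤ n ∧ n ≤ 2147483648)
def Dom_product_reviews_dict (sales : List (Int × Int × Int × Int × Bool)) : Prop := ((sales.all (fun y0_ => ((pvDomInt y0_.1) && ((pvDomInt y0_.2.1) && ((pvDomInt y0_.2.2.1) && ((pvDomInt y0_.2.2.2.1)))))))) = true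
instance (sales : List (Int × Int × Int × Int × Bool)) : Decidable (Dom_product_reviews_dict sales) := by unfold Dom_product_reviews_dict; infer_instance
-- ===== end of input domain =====

-- B replaces A's mutating fold with a filter / ordered-dedup / per-key-sum pipeline (alternative decomposition, same results).


-- ===== PORT A =====
-- loop body of A: skip refunds; update reviews[pid][0] += review, reviews[pid][1] += 1, or create [review, 1]
def pvStepA (d : PySem.Dict Int (List Int)) (sale : Int × Int × Int × Int × Bool) : PySem.Dict Int (List Int) :=
  let refund := sale.2.2.2.2
  if !refund then
    let product_id := sale.2.1
    let review := sale.2.2.1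
    if d.contains product_id then
      -- reviews[product_id][0] += review ; reviews[product_id][1] += 1 (in-place list mutation = re-insert updated list)
      let l0 := d.getD product_id []
      let l1 := PySem.List.pySetD l0 0 (PySem.List.pyGetD l0 0 0 + review)
      let l2 := PySem.List.pySetD l1 1 (PySem.List.pyGetD l1 1 0 + 1)
      d.insert product_id l2
    else d.insert product_id [review, 1]
  else d

def product_reviews_dict (sales : List (Int × Int × Int × Int × Bool)) : List (Int × List Int) :=
  (sales.foldl pvStepA PySem.Dict.empty).items

-- ===== PORT B =====
-- sum(r for q, r in kept if q == p)
def pvSumReviews (kept : List (Int × Int)) (p : Int) : Int :=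
  ((kept.filter (fun q => q.1 == p)).map (·.2)).sum

-- sum(1 for q, _ in kept if q == p)
def pvCountOnes (kept : List (Int × Int)) (p : Int) : Int :=
  ((kept.filter (fun q => q.1 == p)).map (fun _ => (1 : Int))).sum

def product_reviews_dict_alt (sales : List (Int × Int × Int × Int × Bool)) : List (Int × List Int) :=
  let kept := (sales.filter (fun s => !s.2.2.2.2)).map (fun s => (s.2.1, s.2.2.1))
  let order := PySem.List.dedup (kept.map (·.1))
  order.map (fun p => (p, [pvSumReviews kept p, pvCountOnes kept p]))

-- ===== PRECONDITION & SPEC =====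
def Spec_product_reviews_dict (sales : List (Int × Int × Int × Int × Bool)) (out : List (Int × List Int)) : Prop := out = product_reviews_dict_alt sales
instance (sales : List (Int × Int × Int × Int × Bool)) (out : List (Int × List Int)) : Decidable (Spec_product_reviews_dict sales out) := by unfold Spec_product_reviews_dict; infer_instance

-- ===== CLAIM (what is proved, stated in full; the proofs are below) =====
def Claim_equal_product_reviews_dict : Prop := ∀ (sales : List (Int × Int × Int × Int × Bool)), Dom_product_reviews_dict sales → Spec_product_reviews_dict sales (product_reviews_dict sales)

-- ===== LEMMAS AND PROOFS =====

-- A's loop body restricted to the (product_id, review) pair of a non-refunded sale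
def pvStep' (d : PySem.Dict Int (List Int)) (pr : Int × Int) : PySem.Dict Int (List Int) :=
  if d.contains pr.1 then
    let l0 := d.getD pr.1 []
    let l1 := PySem.List.pySetD l0 0 (PySem.List.pyGetD l0 0 0 + pr.2)
    let l2 := PySem.List.pySetD l1 1 (PySem.List.pyGetD l1 1 0 + 1)
    d.insert pr.1 l2
  else d.insert pr.1 [pr.2, 1]

def pvKept (sales : List (Int × Int × Int × Int × Bool)) : List (Int × Int) :=
  (sales.filter (fun s => !s.2.2.2.2)).map (fun s => (s.2.1, s.2.2.1))

def pvTarget (kept : List (Int × Int)) : List (Int × List Int) :=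
  (PySem.List.dedup (kept.map (·.1))).map (fun p => (p, [pvSumReviews kept p, pvCountOnes kept p]))

lemma pvFold_eq_kept (sales : List (Int × Int × Int × Int × Bool)) (d : PySem.Dict Int (List Int)) :
    sales.foldl pvStepA d = (pvKept sales).foldl pvStep' d := by
  induction sales generalizing d with
  | nil => rfl
  | cons s rest ih =>
      rcases s with ⟨a, pid, rv, c, refund⟩
      cases refund <;> simp [pvKept, pvStepA, pvStep', ih]

lemma pvDedup_snoc {α : Type} [BEq α] [LawfulBEq α] (l : List α) (x : α) :
    PySem.List.dedup (l ++ [x]) =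
      if x ∈ l then PySem.List.dedup l else PySem.List.dedup l ++ [x] := by
  simp only [PySem.List.dedup_eq_ofList, PySem.Set.ofList_eq_foldl, List.foldl_append,
    List.foldl_cons, List.foldl_nil]
  rw [PySem.Set.add_eq_ite]
  have hmem : x ∈ List.foldl PySem.Set.add ([] : List α) l ↔ x ∈ l := by
    rw [← PySem.Set.ofList_eq_foldl]; exact PySem.Set.mem_ofList l x
  split_ifs with h1 h2 h2 <;> first | rfl | (exact absurd (hmem.mp h1) h2) | (exact absurd (hmem.mpr h2) h1)

lemma pvSum_snoc (kept : List (Int × Int)) (p r q : Int) :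
    pvSumReviews (kept ++ [(p, r)]) q = pvSumReviews kept q + (if p = q then r else 0) := by
  simp only [pvSumReviews, List.filter_append, List.map_append, List.sum_append]
  by_cases h : p = q <;> simp [h]

lemma pvCount_snoc (kept : List (Int × Int)) (p r q : Int) :
    pvCountOnes (kept ++ [(p, r)]) q = pvCountOnes kept q + (if p = q then 1 else 0) := by
  simp only [pvCountOnes, List.filter_append, List.map_append, List.sum_append]
  by_cases h : p = q <;> simp [h]

lemma pvSum_not_mem (kept : List (Int × Int)) (p : Int) (h : p ∉ kept.map (·.1)) :
    pvSumReviews kept p = 0 := by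
  have : kept.filter (fun q => q.1 == p) = [] := by
    rw [List.filter_eq_nil_iff]
    intro a ha hb
    exact h (List.mem_map.mpr ⟨a, ha, by simpa using hb⟩)
  simp [pvSumReviews, this]

lemma pvCount_not_mem (kept : List (Int × Int)) (p : Int) (h : p ∉ kept.map (·.1)) :
    pvCountOnes kept p = 0 := by
  have : kept.filter (fun q => q.1 == p) = [] := by
    rw [List.filter_eq_nil_iff]
    intro a ha hb
    exact h (List.mem_map.mpr ⟨a, ha, by simpa using hb⟩)
  simp [pvCountOnes, this]

-- A's two in-place updates on a literal two-element entry
lemma pvUpd_full (a b r : Int) :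
    PySem.List.pySetD (PySem.List.pySetD [a, b] 0 (PySem.List.pyGetD [a, b] 0 (0 : Int) + r)) 1
      (PySem.List.pyGetD (PySem.List.pySetD [a, b] 0 (PySem.List.pyGetD [a, b] 0 (0 : Int) + r)) 1 (0 : Int) + 1)
      = [a + r, b + 1] := rfl

-- main invariant: A's fold over the kept pairs produces exactly B's grouped table
lemma pvMain (kept : List (Int × Int)) :
    (kept.foldl pvStep' PySem.Dict.empty).items = pvTarget kept := by
  induction kept using List.reverseRecOn with
  | nil => rfl
  | append_singleton kept pr ih =>
      rcases pr with ⟨p, r⟩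
      set d := kept.foldl pvStep' PySem.Dict.empty with hd
      have hfold : (kept ++ [(p, r)]).foldl pvStep' PySem.Dict.empty = pvStep' d (p, r) := by
        rw [List.foldl_append]; rfl
      set order := PySem.List.dedup (kept.map (·.1)) with horder
      have hkeys : d.keys = order := by
        rw [horder]
        simp [PySem.Dict.keys, ih, pvTarget, List.map_map, Function.comp_def]
      have hnodup : d.keys.Nodup := by
        rw [hkeys, horder, PySem.List.dedup_eq_ofList]; exact PySem.Set.nodup_ofList _
      have hmemkept : p ∈ order ↔ p ∈ kept.map (·.1) := by
        rw [horder, PySem.List.dedup_eq_ofList]; exact PySem.Set.mem_ofList _ p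
      rw [hfold]
      by_cases hp : p ∈ order
      · -- existing key: entry updated in place
        have hcont : d.contains p = true :=
          (PySem.Dict.contains_iff_mem_keys d p).mpr (hkeys ▸ hp)
        have hitem : (p, [pvSumReviews kept p, pvCountOnes kept p]) ∈ d.items := by
          rw [ih]; exact List.mem_map.mpr ⟨p, hp, rfl⟩
        have hgetD : d.getD p [] = [pvSumReviews kept p, pvCountOnes kept p] :=
          PySem.Dict.getD_of_mem_items d hitem hnodup []
        have hsnoc : PySem.List.dedup (kept.map (·.1) ++ [p]) = order := by
          rw [pvDedup_snoc, if_pos (hmemkept.mp hp), horder]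
        simp only [pvStep', hcont, if_true, hgetD]
        rw [pvUpd_full (pvSumReviews kept p) (pvCountOnes kept p) r]
        rw [PySem.Dict.items_insert_of_contains d _ hcont, ih]
        simp only [pvTarget, List.map_append, List.map_cons, List.map_nil]
        rw [hsnoc]
        simp only [List.map_map]
        apply List.map_congr_left
        intro q hq
        by_cases hqp : q = p
        · subst hqp
          simp [Function.comp, pvSum_snoc, pvCount_snoc]
        · have hbe : (q == p) = false := by simp [hqp]
          simp [Function.comp, hbe, pvSum_snoc, pvCount_snoc, Ne.symm hqp]
      · -- new key: appended at the end
        have hcont : d.contains p = false := by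
          rw [← Bool.not_eq_true]; intro h
          exact hp (hkeys ▸ (PySem.Dict.contains_iff_mem_keys d p).mp h)
        have hnotkept : p ∉ kept.map (·.1) := fun h => hp (hmemkept.mpr h)
        have hsnoc : PySem.List.dedup (kept.map (·.1) ++ [p]) = order ++ [p] := by
          rw [pvDedup_snoc, if_neg hnotkept, horder]
        simp only [pvStep', hcont, Bool.false_eq_true, if_false]
        rw [PySem.Dict.items_insert_of_not_contains d _ hcont, ih]
        simp only [pvTarget, List.map_append, List.map_cons, List.map_nil]
        rw [hsnoc]
        simp only [List.map_append]
        congr 1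
        · apply List.map_congr_left
          intro q hq
          have hqp : p ≠ q := fun h => hp (h ▸ hq)
          simp [pvSum_snoc, pvCount_snoc, hqp]
        · simp [pvSum_snoc, pvCount_snoc, pvSum_not_mem kept p hnotkept,
            pvCount_not_mem kept p hnotkept]

-- ===== VERDICT (by name: the statement is the Claim_ definition above) =====
theorem product_reviews_dict_spec : Claim_equal_product_reviews_dict := by
  intro sales _
  show product_reviews_dict sales = product_reviews_dict_alt sales
  rw [product_reviews_dict, pvFold_eq_kept, pvMain]
  rfl
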